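-- pv_equiv track=rewrite | github.com/akashshukla25/minimum_cost_API | main.py | get_required_centers
-- ===== SOURCE A (Python) =====
-- from typing import Dict
--
-- warehouse_products = {
--     "C1": {"A", "B", "C"},
--     "C2": {"D", "E", "F"},
--     "C3": {"G", "H", "I"}
-- }
--
-- def get_required_centers(order: Dict[str, int]):
--     centers = set()
--     for product, qty in order.items():
--         if qty == 0:
--             continue
--         for center, items in warehouse_products.items():
--             if product in items:
--                 centers.add(center)
--                 break
--     return centers
-- ===== SOURCE B (Python) =====
-- from typing import Dict
--
-- warehouse_products = {
--     "C1": {"A", "B", "C"},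
--     "C2": {"D", "E", "F"},
--     "C3": {"G", "H", "I"}
-- }
--
-- # Inverted index built once: product -> its (unique) center.
-- product_to_center = {p: c for c, items in warehouse_products.items() for p in items}
--
-- def get_required_centers(order: Dict[str, int]):
--     centers = set()
--     for product, qty in order.items():
--         if qty != 0 and product in product_to_center:
--             centers.add(product_to_center[product])
--     return centers
-- ===== Notes on version B (the rewrite author's own statement) =====
-- stated objective: idiomatic
-- what changed: Replaced the inner scan over all warehouse centers (first-match with break) by a precomputed inverted index product->center, so each ordered product is resolved by one dictionary lookup; correct because the warehouse product sets are disjoint.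
import Mathlib
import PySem

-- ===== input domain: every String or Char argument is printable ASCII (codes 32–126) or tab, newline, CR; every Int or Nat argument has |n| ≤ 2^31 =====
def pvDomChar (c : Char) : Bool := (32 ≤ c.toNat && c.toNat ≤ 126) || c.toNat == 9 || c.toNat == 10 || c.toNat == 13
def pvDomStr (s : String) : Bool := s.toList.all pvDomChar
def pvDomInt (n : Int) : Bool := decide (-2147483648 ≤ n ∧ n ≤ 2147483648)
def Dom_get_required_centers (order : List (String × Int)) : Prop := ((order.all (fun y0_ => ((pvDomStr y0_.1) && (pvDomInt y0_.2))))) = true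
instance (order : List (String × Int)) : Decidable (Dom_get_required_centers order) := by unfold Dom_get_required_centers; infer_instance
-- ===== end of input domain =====

-- ===== PORT A =====
-- B replaces A's inner scan over the centers with a precomputed inverted index (one lookup per product).
-- warehouse_products as an association list (values are Python sets; only membership is used)
def pvWarehouse : List (String × List String) :=
  [("C1", ["A", "B", "C"]), ("C2", ["D", "E", "F"]), ("C3", ["G", "H", "I"])]

-- inner 'for center, items ... if product in items: add; break' = first match over the table
def pvScan (p : String) : List (String × List String) → Option String
  | [] => none
  | (c, items) :: rest => if items.contains p then some c else pvScan p rest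

def get_required_centers (order : List (String × Int)) : List String :=
  order.foldl (fun centers pq =>
    if pq.2 == (0 : Int) then centers
    else
      match pvScan pq.1 pvWarehouse with
      | some c => PySem.Set.add centers c
      | none => centers) PySem.Set.empty

-- ===== PORT B =====
-- B's module-level inverted index: {p: c for c, items in warehouse_products.items() for p in items}
def pvP2C : PySem.Dict String String :=
  pvWarehouse.foldl (fun d ci => ci.2.foldl (fun d p => d.insert p ci.1) d) PySem.Dict.empty

def get_required_centers_alt (order : List (String × Int)) : List String :=
  order.foldl (fun centers pq =>
    if pq.2 == (0 : Int) then centers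
    else
      match pvP2C.get? pq.1 with
      | some c => PySem.Set.add centers c
      | none => centers) PySem.Set.empty

-- ===== PRECONDITION & SPEC =====
def Spec_get_required_centers (order : List (String × Int)) (out : List String) : Prop := out = get_required_centers_alt order
instance (order : List (String × Int)) (out : List String) : Decidable (Spec_get_required_centers order out) := by unfold Spec_get_required_centers; infer_instance

-- ===== CLAIM (what is proved, stated in full; the proofs are below) =====
def Claim_equal_get_required_centers : Prop := ∀ (order : List (String × Int)), Dom_get_required_centers order → Spec_get_required_centers order (get_required_centers order)

-- ===== LEMMAS AND PROOFS =====
-- the index lookup agrees with the first-match scan on every string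
set_option maxHeartbeats 2000000 in
theorem pvScan_eq_get? (p : String) : pvScan p pvWarehouse = pvP2C.get? p := by
  have h : pvP2C = PySem.Dict.mk [("A", "C1"), ("B", "C1"), ("C", "C1"),
      ("D", "C2"), ("E", "C2"), ("F", "C2"), ("G", "C3"), ("H", "C3"), ("I", "C3")] := by decide
  rw [h]
  by_cases hA : p = "A"
  · subst hA; decide
  by_cases hB : p = "B"
  · subst hB; decide
  by_cases hC : p = "C"
  · subst hC; decide
  by_cases hD : p = "D"
  · subst hD; decide
  by_cases hE : p = "E"
  · subst hE; decide
  by_cases hF : p = "F"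
  · subst hF; decide
  by_cases hG : p = "G"
  · subst hG; decide
  by_cases hH : p = "H"
  · subst hH; decide
  by_cases hI : p = "I"
  · subst hI; decide
  simp [pvScan, pvWarehouse, PySem.Dict.get?, beq_iff_eq,
    hA, Ne.symm hA, hB, Ne.symm hB, hC, Ne.symm hC, hD, Ne.symm hD, hE, Ne.symm hE, hF, Ne.symm hF, hG, Ne.symm hG, hH, Ne.symm hH, hI, Ne.symm hI]

-- ===== VERDICT (by name: the statement is the Claim_ definition above) =====
theorem get_required_centers_spec : Claim_equal_get_required_centers := by
  intro order _
  unfold Spec_get_required_centers get_required_centers get_required_centers_alt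
  congr 1
  funext centers pq
  rw [pvScan_eq_get?]
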